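-- pv_equiv track=rewrite | github.com/Johannesfjeldsaa/pyClimExtremes | src/pyClimExtremes/indices/registry.py | input_var_str_normalize
-- ===== SOURCE A (Python) =====
-- INPUT_VAR_ALIASES = {
--     "tasmax": ["tasmax", "tx"],
--     "tasmin": ["tasmin", "tn"],
--     "pr": ["pr", "precip", "prcp", 'prect'],
--     "tas": ["tas", "tavg"],
-- }
--
-- def input_var_str_normalize(name: str) -> str:
--     """Normalize input variable names to their canonical IDs.
--
--     Maps aliases (e.g., 'tx' -> 'tasmax') using INPUT_VAR_ALIASES.
--     Returns the canonical variable name if found; otherwise returns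
--     the original name unchanged.
--     """
--     if not isinstance(name, str):
--         return name
--     lower = name.strip().lower()
--     for canonical, aliases in INPUT_VAR_ALIASES.items():
--         if lower in [alias.lower() for alias in aliases]:
--             return canonical
--     return name
-- ===== SOURCE B (Python) =====
-- INPUT_VAR_ALIASES = {
--     "tasmax": ["tasmax", "tx"],
--     "tasmin": ["tasmin", "tn"],
--     "pr": ["pr", "precip", "prcp", 'prect'],
--     "tas": ["tas", "tavg"],
-- }
--
-- # Flat index built once: each lowercased alias maps straight to its canonical name.
-- _FLAT = {
--     alias.lower(): canonical
--     for canonical, aliases in INPUT_VAR_ALIASES.items()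
--     for alias in aliases
-- }
--
-- def input_var_str_normalize(name: str) -> str:
--     """Normalize input variable names to their canonical IDs via a flat index."""
--     if not isinstance(name, str):
--         return name
--     return _FLAT.get(name.strip().lower(), name)
-- ===== Notes on version B (the rewrite author's own statement) =====
-- stated objective: simpler
-- what changed: B precomputes a flat lowercased-alias-to-canonical dictionary once at module level, replacing A's per-call nested loop (scan entries, rebuild and scan each lowered alias list) with a single dict lookup with the original name as default.
import Mathlib
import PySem

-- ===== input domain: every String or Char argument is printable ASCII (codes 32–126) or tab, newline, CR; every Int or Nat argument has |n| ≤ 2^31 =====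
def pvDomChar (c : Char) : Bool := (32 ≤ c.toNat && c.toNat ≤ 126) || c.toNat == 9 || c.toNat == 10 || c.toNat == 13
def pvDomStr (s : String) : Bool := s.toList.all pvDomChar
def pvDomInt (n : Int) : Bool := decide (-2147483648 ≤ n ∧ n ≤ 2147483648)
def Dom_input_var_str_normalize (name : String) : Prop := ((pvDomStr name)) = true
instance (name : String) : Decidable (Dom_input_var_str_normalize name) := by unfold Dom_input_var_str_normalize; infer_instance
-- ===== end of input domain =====

-- B replaces A's per-entry scan over INPUT_VAR_ALIASES by a flat alias→canonical index built once; objective: simpler (single lookup).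

-- ===== PORT A =====
def INPUT_VAR_ALIASES : List (String × List String) :=
  [("tasmax", ["tasmax", "tx"]),
   ("tasmin", ["tasmin", "tn"]),
   ("pr", ["pr", "precip", "prcp", "prect"]),
   ("tas", ["tas", "tavg"])]

-- the 'for canonical, aliases in …' loop with its early return
def pvAliasScan (lower name : String) : List (String × List String) → String
  | [] => name
  | (canonical, aliases) :: rest =>
      if (aliases.map PySem.Str.lower).contains lower then canonical
      else pvAliasScan lower name rest

def input_var_str_normalize (name : String) : String :=
  pvAliasScan (PySem.Str.lower (PySem.Str.strip name)) name INPUT_VAR_ALIASES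

-- ===== PORT B =====
-- the module-level dict comprehension _FLAT
def pvFlat : PySem.Dict String String :=
  INPUT_VAR_ALIASES.foldl
    (fun d p => p.2.foldl (fun d a => d.insert (PySem.Str.lower a) p.1) d)
    PySem.Dict.empty

def input_var_str_normalize_alt (name : String) : String :=
  PySem.Dict.getD pvFlat (PySem.Str.lower (PySem.Str.strip name)) name

-- ===== PRECONDITION & SPEC =====
def Spec_input_var_str_normalize (name : String) (out : String) : Prop := out = input_var_str_normalize_alt name
instance (name : String) (out : String) : Decidable (Spec_input_var_str_normalize name out) := by unfold Spec_input_var_str_normalize; infer_instance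

-- ===== CLAIM (what is proved, stated in full; the proofs are below) =====
def Claim_equal_input_var_str_normalize : Prop := ∀ (name : String), Dom_input_var_str_normalize name → Spec_input_var_str_normalize name (input_var_str_normalize name)

-- ===== LEMMAS AND PROOFS =====

-- both programs reduce the same lowered key through the same tiny fixed table
theorem pvScan_eq_flat (s name : String) :
    pvAliasScan s name INPUT_VAR_ALIASES = PySem.Dict.getD pvFlat s name := by
  by_cases h : s ∈ ["tasmax", "tx", "tasmin", "tn", "pr", "precip", "prcp", "prect", "tas", "tavg"]
  · fin_cases h <;> rfl
  · simp only [List.mem_cons, List.not_mem_nil, or_false, not_or] at h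
    obtain ⟨n1, n2, n3, n4, n5, n6, n7, n8, n9, n10⟩ := h
    have hflat : pvFlat = ⟨[("tasmax", "tasmax"), ("tx", "tasmax"),
        ("tasmin", "tasmin"), ("tn", "tasmin"),
        ("pr", "pr"), ("precip", "pr"), ("prcp", "pr"), ("prect", "pr"),
        ("tas", "tas"), ("tavg", "tas")]⟩ := by decide
    rw [hflat]
    have m1 : ("tasmax" == s) = false := beq_eq_false_iff_ne.mpr (Ne.symm n1)
    have m2 : ("tx" == s) = false := beq_eq_false_iff_ne.mpr (Ne.symm n2)
    have m3 : ("tasmin" == s) = false := beq_eq_false_iff_ne.mpr (Ne.symm n3)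
    have m4 : ("tn" == s) = false := beq_eq_false_iff_ne.mpr (Ne.symm n4)
    have m5 : ("pr" == s) = false := beq_eq_false_iff_ne.mpr (Ne.symm n5)
    have m6 : ("precip" == s) = false := beq_eq_false_iff_ne.mpr (Ne.symm n6)
    have m7 : ("prcp" == s) = false := beq_eq_false_iff_ne.mpr (Ne.symm n7)
    have m8 : ("prect" == s) = false := beq_eq_false_iff_ne.mpr (Ne.symm n8)
    have m9 : ("tas" == s) = false := beq_eq_false_iff_ne.mpr (Ne.symm n9)
    have m10 : ("tavg" == s) = false := beq_eq_false_iff_ne.mpr (Ne.symm n10)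
    simp [pvAliasScan, INPUT_VAR_ALIASES, PySem.Dict.getD, PySem.Dict.get?, List.find?,
      show PySem.Str.lower "tasmax" = "tasmax" from by decide,
      show PySem.Str.lower "tx" = "tx" from by decide,
      show PySem.Str.lower "tasmin" = "tasmin" from by decide,
      show PySem.Str.lower "tn" = "tn" from by decide,
      show PySem.Str.lower "pr" = "pr" from by decide,
      show PySem.Str.lower "precip" = "precip" from by decide,
      show PySem.Str.lower "prcp" = "prcp" from by decide,
      show PySem.Str.lower "prect" = "prect" from by decide,
      show PySem.Str.lower "tas" = "tas" from by decide,
      show PySem.Str.lower "tavg" = "tavg" from by decide,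
      n1, n2, n3, n4, n5, n6, n7, n8, n9, n10, Ne.symm,
      m1, m2, m3, m4, m5, m6, m7, m8, m9, m10]

-- ===== VERDICT (by name: the statement is the Claim_ definition above) =====
theorem input_var_str_normalize_spec : Claim_equal_input_var_str_normalize := by
  intro name _
  unfold Spec_input_var_str_normalize input_var_str_normalize input_var_str_normalize_alt
  exact pvScan_eq_flat _ _
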